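-- pv_equiv track=rewrite | github.com/cecilia-uu/LeetCode | OA/meta/12_pairs.py | solution
-- ===== SOURCE A (Python) =====
-- def solution(a, b):
--     n = len(a)
--     res = 0
--     for i in range(n):
--         for j in range(i, n):
--             if a[i] - b[j] == a[j] - b[i]:
--                 res += 1
--     return res
-- ===== SOURCE B (Python) =====
-- def solution(a, b):
--     counts = {}
--     res = 0
--     for x, y in zip(a, b):
--         k = x + y
--         c = counts.get(k, 0)
--         res += c + 1
--         counts[k] = c + 1
--     return res
-- ===== Notes on version B (the rewrite author's own statement) =====
-- stated objective: faster
-- what changed: Replaced the O(n^2) nested index scan by a single pass that hash-groups each position by its key a[k]+b[k] and adds (seen-count of the key)+1 per element.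
import Mathlib
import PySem

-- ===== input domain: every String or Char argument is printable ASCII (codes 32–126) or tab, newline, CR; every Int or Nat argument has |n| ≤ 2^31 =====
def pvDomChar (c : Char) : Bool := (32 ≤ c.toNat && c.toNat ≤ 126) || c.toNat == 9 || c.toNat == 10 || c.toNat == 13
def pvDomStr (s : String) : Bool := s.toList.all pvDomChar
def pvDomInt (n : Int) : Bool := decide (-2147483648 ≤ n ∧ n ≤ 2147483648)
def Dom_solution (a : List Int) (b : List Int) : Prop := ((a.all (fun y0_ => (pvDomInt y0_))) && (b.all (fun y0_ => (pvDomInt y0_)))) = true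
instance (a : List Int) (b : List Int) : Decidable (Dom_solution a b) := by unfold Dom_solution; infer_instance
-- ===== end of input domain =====

-- B replaces A's O(n^2) nested index scan by one hash-grouping pass over the index keys a[k]+b[k].
-- ===== PORT A =====
def solution (a : List Int) (b : List Int) : Int :=
  (PySem.List.pyRange 0 (a.length : Int) 1).foldl (fun res i =>
    (PySem.List.pyRange i (a.length : Int) 1).foldl (fun res j =>
      if PySem.List.pyGetD a i 0 - PySem.List.pyGetD b j 0
           == PySem.List.pyGetD a j 0 - PySem.List.pyGetD b i 0
      then res + 1 else res) res) 0

-- ===== PORT B =====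
def solution_alt (a : List Int) (b : List Int) : Int :=
  ((a.zip b).foldl (fun (st : PySem.Dict Int Int × Int) p =>
    (st.1.insert (p.1 + p.2) (st.1.getD (p.1 + p.2) 0 + 1),
     st.2 + (st.1.getD (p.1 + p.2) 0 + 1))) (PySem.Dict.empty, 0)).2

-- ===== PRECONDITION & SPEC =====
-- Pre_ excludes exactly the inputs where A raises IndexError: b shorter than a (A reads b[j] for every j < len(a)).
def Pre_solution (a : List Int) (b : List Int) : Prop := a.length ≤ b.length
instance (a : List Int) (b : List Int) : Decidable (Pre_solution a b) := by unfold Pre_solution; infer_instance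
def pvWitness_solution : List Int × List Int := ([1, 2, 3], [4, 2, 3])

def Spec_solution (a : List Int) (b : List Int) (out : Int) : Prop := out = solution_alt a b
instance (a : List Int) (b : List Int) (out : Int) : Decidable (Spec_solution a b out) := by unfold Spec_solution; infer_instance

-- ===== CLAIM (what is proved, stated in full; the proofs are below) =====
def Claim_equal_solution : Prop := ∀ (a : List Int) (b : List Int), Dom_solution a b → Pre_solution a b → Spec_solution a b (solution a b)

-- ===== LEMMAS AND PROOFS =====

-- the key list: position k carries a[k]+b[k]
def pvKeys (a b : List Int) : List Int := (a.zip b).map (fun p => p.1 + p.2)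

-- A's count, recursively from the left: head matches the whole list, then recurse
def pvDCount : List Int → Int
  | [] => 0
  | k :: t => ((k :: t).count k : Int) + pvDCount t

-- B's count, recursively from the left with the already-seen prefix
def pvPairCount : List Int → List Int → Int
  | _, [] => 0
  | pre, k :: t => ((pre.count k : Int) + 1) + pvPairCount (pre ++ [k]) t

lemma pvB_inv (ks : List Int) :
    ∀ (d : PySem.Dict Int Int) (pre : List Int) (r : Int),
    (∀ v, d.getD v 0 = (pre.count v : Int)) →
    (ks.foldl (fun (st : PySem.Dict Int Int × Int) k =>
        (st.1.insert k (st.1.getD k 0 + 1), st.2 + (st.1.getD k 0 + 1))) (d, r)).2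
      = r + pvPairCount pre ks := by
  induction ks with
  | nil => intro d pre r _; simp [pvPairCount]
  | cons k t ih =>
    intro d pre r h
    simp only [List.foldl_cons, pvPairCount]
    rw [ih (d.insert k (d.getD k 0 + 1)) (pre ++ [k]) _ ?_]
    · rw [h k]; ring
    · intro v
      rw [PySem.Dict.getD_insert, List.count_append, h v]
      by_cases hv : v = k
      · simp [hv, h k]
      · have : List.count v [k] = 0 := by simp [List.count_eq_zero]; exact hv
        simp [hv, this]

lemma pvPairCount_eq (ks : List Int) :
    ∀ pre : List Int, pvPairCount pre ks = pvDCount ks + (ks.map (fun x => (pre.count x : Int))).sum := by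
  induction ks with
  | nil => intro pre; simp [pvPairCount, pvDCount]
  | cons k t ih =>
    intro pre
    simp only [pvPairCount, pvDCount, List.map_cons, List.sum_cons, ih (pre ++ [k])]
    have h1 : (t.map (fun x => (((pre ++ [k]).count x : Nat) : Int))).sum
        = (t.map (fun x => (pre.count x : Int))).sum + (t.count k : Int) := by
      have : ∀ x ∈ t, (((pre ++ [k]).count x : Nat) : Int)
          = (pre.count x : Int) + (if x == k then (1 : Int) else 0) := by
        intro x _
        rw [List.count_append]
        by_cases hx : x = k
        · simp [hx]
        · have h0 : List.count x [k] = 0 := by simp [List.count_eq_zero]; exact hx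
          simp [hx, h0]
      rw [List.map_congr_left this, PySem.List.sum_map_add_int]
      congr 1
      rw [PySem.List.sum_map_ite_one_zero]
      simp [List.count]
    rw [h1, List.count_cons]
    push_cast
    simp
    ring

lemma pvDCount_eq_sum (ks : List Int) :
    pvDCount ks = ((List.range ks.length).map
      (fun i => (((ks.drop i).count (ks.getD i 0) : Nat) : Int))).sum := by
  induction ks with
  | nil => simp [pvDCount]
  | cons k t ih =>
    rw [pvDCount, ih]
    simp only [List.length_cons, List.range_succ_eq_map, List.map_cons, List.sum_cons,
      List.map_map]
    have hmap : ∀ i ∈ List.range t.length,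
        ((fun i => ((((k :: t).drop i).count ((k :: t).getD i 0) : Nat) : Int)) ∘ Nat.succ) i
          = ((((t.drop i).count (t.getD i 0) : Nat) : Int)) := by
      intro i _; simp [Function.comp]
    rw [List.map_congr_left hmap]
    simp

lemma pvKeys_len (a b : List Int) (h : a.length ≤ b.length) : (pvKeys a b).length = a.length := by
  simp [pvKeys]; omega

lemma pvKeys_get (a b : List Int) (h : a.length ≤ b.length) (j : Int) (h0 : 0 ≤ j) (h1 : j < (a.length : Int)) :
    PySem.List.pyGetD (pvKeys a b) j 0 = PySem.List.pyGetD a j 0 + PySem.List.pyGetD b j 0 := by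
  have hj : j.toNat < a.length := by omega
  rw [PySem.List.pyGetD_eq_getElem (pvKeys a b) 0 h0 (by rw [pvKeys_len a b h]; exact_mod_cast h1),
      PySem.List.pyGetD_eq_getElem a 0 h0 (by exact_mod_cast h1),
      PySem.List.pyGetD_eq_getElem b 0 h0 (by omega)]
  simp [pvKeys]

lemma pvA_term (a b : List Int) (h : a.length ≤ b.length) (i : Nat) (hi : i < a.length) :
    ((PySem.List.pyRange (i : Int) ((a.length : Int)) 1).countP
       (fun j => PySem.List.pyGetD a (i : Int) 0 - PySem.List.pyGetD b j 0
               == PySem.List.pyGetD a j 0 - PySem.List.pyGetD b (i : Int) 0))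
    = ((pvKeys a b).drop i).count ((pvKeys a b).getD i 0) := by
  have hcg : (PySem.List.pyRange (i : Int) ((a.length : Int)) 1).countP
       (fun j => PySem.List.pyGetD a (i : Int) 0 - PySem.List.pyGetD b j 0
               == PySem.List.pyGetD a j 0 - PySem.List.pyGetD b (i : Int) 0)
      = (PySem.List.pyRange (i : Int) ((a.length : Int)) 1).countP
       (fun j => PySem.List.pyGetD (pvKeys a b) j 0 == PySem.List.pyGetD (pvKeys a b) (i : Int) 0) := by
    apply List.countP_congr
    intro j hj
    rw [PySem.List.mem_pyRange_one] at hj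
    rw [pvKeys_get a b h j (by omega) (by omega), pvKeys_get a b h (i : Int) (by omega) (by exact_mod_cast hi)]
    simp only [beq_iff_eq]
    omega
  rw [hcg]
  have h0i : (0 : Int) ≤ (i : Int) := by omega
  have hdrop : ((pvKeys a b).drop i) = (PySem.List.pyRange (i : Int) (((pvKeys a b).length : Int)) 1).map
      (fun j => PySem.List.pyGetD (pvKeys a b) j 0) := by
    have := (PySem.List.map_pyGetD_pyRange' (pvKeys a b) 0 h0i).symm
    simpa using this
  rw [hdrop, pvKeys_len a b h]
  simp only [List.count, List.countP_map]
  apply List.countP_congr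
  intro j hj
  rw [PySem.List.mem_pyRange_one] at hj
  simp only [Function.comp]
  have : PySem.List.pyGetD (pvKeys a b) (i : Int) 0 = (pvKeys a b).getD i 0 := by
    simp [PySem.List.pyGetD_natCast]
  rw [this]

theorem solution_spec : Claim_equal_solution := by
  intro a b _ hpre
  unfold Spec_solution solution solution_alt Pre_solution at *
  -- B side
  have hB : ((a.zip b).foldl (fun (st : PySem.Dict Int Int × Int) p =>
      (st.1.insert (p.1 + p.2) (st.1.getD (p.1 + p.2) 0 + 1),
       st.2 + (st.1.getD (p.1 + p.2) 0 + 1))) (PySem.Dict.empty, 0)).2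
      = pvPairCount [] (pvKeys a b) := by
    rw [show ((a.zip b).foldl (fun (st : PySem.Dict Int Int × Int) p =>
      (st.1.insert (p.1 + p.2) (st.1.getD (p.1 + p.2) 0 + 1),
       st.2 + (st.1.getD (p.1 + p.2) 0 + 1))) (PySem.Dict.empty, 0))
      = ((pvKeys a b).foldl (fun (st : PySem.Dict Int Int × Int) k =>
      (st.1.insert k (st.1.getD k 0 + 1), st.2 + (st.1.getD k 0 + 1))) (PySem.Dict.empty, 0))
      from by unfold pvKeys; rw [List.foldl_map]]
    rw [pvB_inv (pvKeys a b) PySem.Dict.empty [] 0 (by intro v; simp)]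
    ring
  -- A side
  rw [PySem.List.foldl_congr_mem _ _ (fun res i =>
      res + (((PySem.List.pyRange i ((a.length : Int)) 1).countP
        (fun j => PySem.List.pyGetD a i 0 - PySem.List.pyGetD b j 0
                == PySem.List.pyGetD a j 0 - PySem.List.pyGetD b i 0)) : Int)) _
      (by intro acc i _; rw [PySem.List.foldl_if_add_one])]
  rw [PySem.List.foldl_add]
  rw [PySem.List.pyRange_one]
  simp only [List.map_map, zero_add, Int.sub_zero, Int.toNat_natCast]
  have hterm : ∀ i ∈ List.range a.length,
      ((fun i => (((PySem.List.pyRange i ((a.length : Int)) 1).countP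
        (fun j => PySem.List.pyGetD a i 0 - PySem.List.pyGetD b j 0
                == PySem.List.pyGetD a j 0 - PySem.List.pyGetD b i 0)) : Int)) ∘ (fun k : Nat => (k : Int))) i
      = ((((pvKeys a b).drop i).count ((pvKeys a b).getD i 0) : Nat) : Int) := by
    intro i hi
    rw [List.mem_range] at hi
    simp only [Function.comp]
    rw [pvA_term a b hpre i hi]
  rw [List.map_congr_left hterm]
  rw [hB, pvPairCount_eq, pvDCount_eq_sum]
  simp [pvKeys_len a b hpre]
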